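-- pv_equiv track=rewrite | github.com/mbarr3/INST326_2025_FALL_FINAL_PROJECT | AurdosFP1.py | update_card_status
-- ===== SOURCE A (Python) =====
-- def update_card_status(required, rolled):
--     """
--     Side-effects:
--         Compare the player's dice list to the card's required dice to see which match.
--         If the player busts, clear the player's dice list.
--         Update the card's status based on whether all required dice are matched.
--
--     Returns:
--         bool: True if the card is complete, False if still in progress.
--     """
--
--     need = required.copy()
--
--     for d in rolled:
--         if d in need:
--             need.remove(d)
--         else:
--             rolled.clear()
--             return False
--
--     return len(need) == 0
-- ===== SOURCE B (Python) =====
-- def update_card_status(required, rolled):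
--     # Count-table comparison: bust (and clear rolled) iff some value is
--     # over-represented in rolled; otherwise complete iff sizes match.
--     if any(rolled.count(v) > required.count(v) for v in set(rolled)):
--         rolled.clear()
--         return False
--     return len(rolled) == len(required)
-- ===== Notes on version B (the rewrite author's own statement) =====
-- stated objective: simpler
-- what changed: Replaces the destructive element-by-element consumption of a copy of required (membership test + remove per rolled die) with an up-front per-value count comparison over set(rolled) plus a single length check; the rolled.clear() side effect on bust is preserved.
import Mathlib
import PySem

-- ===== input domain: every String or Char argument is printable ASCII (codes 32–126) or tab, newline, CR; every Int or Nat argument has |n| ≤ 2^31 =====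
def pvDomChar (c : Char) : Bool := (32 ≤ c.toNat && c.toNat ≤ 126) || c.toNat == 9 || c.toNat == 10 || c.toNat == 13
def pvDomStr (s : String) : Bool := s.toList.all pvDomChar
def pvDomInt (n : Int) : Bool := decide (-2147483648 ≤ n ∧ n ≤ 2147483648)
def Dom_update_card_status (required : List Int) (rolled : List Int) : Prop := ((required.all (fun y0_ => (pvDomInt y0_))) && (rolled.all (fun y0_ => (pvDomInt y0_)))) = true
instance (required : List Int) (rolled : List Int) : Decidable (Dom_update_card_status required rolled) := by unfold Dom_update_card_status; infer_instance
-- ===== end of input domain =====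

-- B replaces A's destructive consumption of a copy of `required` with up-front
-- per-value count comparison plus a length check (objective: simpler).
-- Equivalence is about the RETURN value; both Pythons perform the same
-- rolled.clear() mutation on bust.

-- ===== PORT A =====
-- loop 'for d in rolled' over state need; remove? is some (need.erase d) when d ∈ need
def pvALoop (need : List Int) (rolled : List Int) : Bool :=
  match rolled with
  | [] => need.length == 0
  | d :: rest =>
    if need.contains d then
      pvALoop ((PySem.List.remove? need d).getD need) rest
    else
      false

def update_card_status (required : List Int) (rolled : List Int) : Bool :=
  pvALoop required rolled

-- ===== PORT B =====
def update_card_status_alt (required : List Int) (rolled : List Int) : Bool :=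
  if (PySem.Set.ofList rolled).any (fun v => PySem.List.count rolled v > PySem.List.count required v) then
    false
  else
    rolled.length == required.length

-- ===== PRECONDITION & SPEC =====
def Spec_update_card_status (required : List Int) (rolled : List Int) (out : Bool) : Prop := out = update_card_status_alt required rolled
instance (required : List Int) (rolled : List Int) (out : Bool) : Decidable (Spec_update_card_status required rolled out) := by unfold Spec_update_card_status; infer_instance

-- ===== CLAIM (what is proved, stated in full; the proofs are below) =====
def Claim_equal_update_card_status : Prop := ∀ (required : List Int) (rolled : List Int), Dom_update_card_status required rolled → Spec_update_card_status required rolled (update_card_status required rolled)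

-- ===== LEMMAS AND PROOFS =====

theorem pvALoop_true_iff (rolled : List Int) : ∀ (need : List Int),
    pvALoop need rolled = true ↔
      ((∀ v, rolled.count v ≤ need.count v) ∧ rolled.length = need.length) := by
  induction rolled with
  | nil =>
    intro need
    simp only [pvALoop, beq_iff_eq, List.count_nil, List.length_nil]
    constructor
    · intro h
      exact ⟨fun v => Nat.zero_le _, by omega⟩
    · rintro ⟨-, h⟩
      omega
  | cons d rest ih =>
    intro need
    by_cases hd : d ∈ need
    · rw [pvALoop]
      simp only [List.contains_eq_mem, hd, decide_true, if_true,
        PySem.List.remove?_eq_some_erase need d hd, Option.getD_some]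
      rw [ih]
      have hcount : 1 ≤ need.count d := List.one_le_count_iff.mpr hd
      have hlen : (need.erase d).length = need.length - 1 := List.length_erase_of_mem hd
      have hpos : 0 < need.length := List.length_pos_of_mem hd
      constructor
      · rintro ⟨hc, hl⟩
        constructor
        · intro v
          by_cases hv : v = d
          · subst hv
            have h1 := hc v
            rw [List.count_erase_self] at h1
            rw [List.count_cons_self]
            omega
          · have h1 := hc v
            rw [List.count_erase_of_ne hv] at h1
            simpa [List.count_cons, Ne.symm hv] using h1
        · simp only [List.length_cons]
          omega
      · rintro ⟨hc, hl⟩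
        constructor
        · intro v
          by_cases hv : v = d
          · subst hv
            have h1 := hc v
            rw [List.count_cons_self] at h1
            rw [List.count_erase_self]
            omega
          · have h1 := hc v
            rw [List.count_erase_of_ne hv]
            simpa [List.count_cons, Ne.symm hv] using h1
        · simp only [List.length_cons] at hl
          omega
    · rw [pvALoop]
      simp only [List.contains_eq_mem, hd, decide_false]
      constructor
      · intro h
        exact absurd h (by simp)
      · rintro ⟨hc, -⟩
        have h1 := hc d
        rw [List.count_eq_zero_of_not_mem hd, List.count_cons_self] at h1
        omega

theorem alt_true_iff (required rolled : List Int) :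
    update_card_status_alt required rolled = true ↔
      ((∀ v, rolled.count v ≤ required.count v) ∧ rolled.length = required.length) := by
  unfold update_card_status_alt
  by_cases h : ∃ v ∈ rolled, required.count v < rolled.count v
  · obtain ⟨v, hv, hlt⟩ := h
    have : (PySem.Set.ofList rolled).any (fun v => PySem.List.count rolled v > PySem.List.count required v) = true := by
      refine List.any_eq_true.mpr ⟨v, ?_, ?_⟩
      · exact (PySem.Set.mem_ofList rolled v).mpr hv
      · simp [PySem.List.count_eq]; omega
    rw [this]
    simp only [if_true]
    constructor
    · intro h; exact absurd h (by simp)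
    · rintro ⟨hc, -⟩
      exact absurd hlt (by have := hc v; omega)
  · have hall : ∀ v, rolled.count v ≤ required.count v := by
      intro v
      by_cases hv : v ∈ rolled
      · by_contra hlt
        exact h ⟨v, hv, by omega⟩
      · rw [List.count_eq_zero_of_not_mem hv]; omega
    have : (PySem.Set.ofList rolled).any (fun v => PySem.List.count rolled v > PySem.List.count required v) = false := by
      rw [List.any_eq_false]
      intro v hv
      have hv' : v ∈ rolled := (PySem.Set.mem_ofList rolled v).mp hv
      simp [PySem.List.count_eq]
      exact hall v
    rw [this]
    simp only [Bool.false_eq_true, if_false, beq_iff_eq]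
    exact ⟨fun h => ⟨hall, h⟩, fun ⟨_, h⟩ => h⟩

-- ===== VERDICT (by name: the statement is the Claim_ definition above) =====
theorem update_card_status_spec : Claim_equal_update_card_status := by
  intro required rolled _
  unfold Spec_update_card_status update_card_status
  rw [Bool.eq_iff_iff, pvALoop_true_iff, alt_true_iff]
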